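-- pv_equiv track=rewrite | github.com/serb00/AlgoExpert | Strings/Easy/014_generate_document.py | generateDocument
-- ===== SOURCE A (Python) =====
-- def generateDocument(characters, document):
--     # Write your code here.
--     hash = dict()
--     for c in characters:
--         hash[c] = hash[c] + 1 if c in hash else 1
--
--     for c in document:
--         if c not in hash or hash[c] == 0:
--             return False
--         hash[c] -= 1
--
--     return True
-- ===== SOURCE B (Python) =====
-- def generateDocument(characters, document):
--     # Build two frequency tables, then compare per distinct document character.
--     char_counts = {}
--     for c in characters:
--         char_counts[c] = char_counts.get(c, 0) + 1
--     doc_counts = {}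
--     for c in document:
--         doc_counts[c] = doc_counts.get(c, 0) + 1
--     for ch, needed in doc_counts.items():
--         if char_counts.get(ch, 0) < needed:
--             return False
--     return True
-- ===== Notes on version B (the rewrite author's own statement) =====
-- stated objective: alternative
-- what changed: Replaces A's per-character decrement pass over the document (mutating one dict) with building two immutable frequency tables and comparing them over the document's distinct characters.
import Mathlib
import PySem

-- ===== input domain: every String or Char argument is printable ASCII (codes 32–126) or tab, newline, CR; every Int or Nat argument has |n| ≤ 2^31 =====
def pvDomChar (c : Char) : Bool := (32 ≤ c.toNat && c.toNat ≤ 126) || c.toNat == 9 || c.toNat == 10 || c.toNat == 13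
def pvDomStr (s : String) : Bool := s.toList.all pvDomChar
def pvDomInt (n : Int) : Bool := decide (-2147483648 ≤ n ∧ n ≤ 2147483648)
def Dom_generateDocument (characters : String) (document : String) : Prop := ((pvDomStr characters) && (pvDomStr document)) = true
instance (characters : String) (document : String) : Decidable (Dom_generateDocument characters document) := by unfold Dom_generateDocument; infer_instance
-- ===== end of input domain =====

-- B replaces A's decrement pass over one dict by building two frequency tables and
-- comparing them over the document's distinct characters (alternative decomposition, same cost).

-- ===== PORT A =====
-- the 'for c in document' loop with its early 'return False'
def genDocLoopA (d : PySem.Dict Char Int) : List Char → Bool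
  | [] => true
  | c :: rest =>
      if !d.contains c || d.getD c 0 == 0 then false
      else genDocLoopA (d.insert c (d.getD c (0:Int) - 1)) rest

def generateDocument (characters : String) (document : String) : Bool :=
  let hash := characters.toList.foldl
    (fun d c => d.insert c (if d.contains c then d.getD c (0:Int) + 1 else 1)) PySem.Dict.empty
  genDocLoopA hash document.toList

-- ===== PORT B =====
def generateDocument_alt (characters : String) (document : String) : Bool :=
  let charCounts := characters.toList.foldl
    (fun d c => d.insert c (d.getD c (0:Int) + 1)) PySem.Dict.empty
  let docCounts := document.toList.foldl
    (fun d c => d.insert c (d.getD c (0:Int) + 1)) PySem.Dict.empty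
  docCounts.items.all (fun p => !(charCounts.getD p.1 (0:Int) < p.2 : Bool))

-- ===== PRECONDITION & SPEC =====
def Spec_generateDocument (characters : String) (document : String) (out : Bool) : Prop := out = generateDocument_alt characters document
instance (characters : String) (document : String) (out : Bool) : Decidable (Spec_generateDocument characters document out) := by unfold Spec_generateDocument; infer_instance

-- ===== CLAIM (what is proved, stated in full; the proofs are below) =====
def Claim_equal_generateDocument : Prop := ∀ (characters : String) (document : String), Dom_generateDocument characters document → Spec_generateDocument characters document (generateDocument characters document)

-- ===== LEMMAS AND PROOFS =====

-- A's building step writes getD+1 in both branches (in the else branch getD is 0)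
lemma stepA_eq (d : PySem.Dict Char Int) (c : Char) :
    d.insert c (if d.contains c then d.getD c (0:Int) + 1 else 1) = d.insert c (d.getD c (0:Int) + 1) := by
  by_cases h : d.contains c = true
  · simp [h]
  · have h0 : d.getD c 0 = 0 :=
      PySem.Dict.getD_of_not_contains (d := d) (k := c) (d0 := 0) (by simpa using h)
    simp [h, h0]

lemma foldA_eq (l : List Char) :
    l.foldl (fun d c => d.insert c (if d.contains c then d.getD c (0:Int) + 1 else 1)) PySem.Dict.empty
      = PySem.Dict.counter l := by
  simp only [stepA_eq]
  exact PySem.Dict.foldl_insert_getD_add_one_eq_counter l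

-- characterisation of A's decrement loop
lemma genDocLoopA_iff (doc : List Char) (d : PySem.Dict Char Int)
    (hnn : ∀ c, 0 ≤ d.getD c 0) :
    genDocLoopA d doc = true ↔ ∀ c, (doc.count c : Int) ≤ d.getD c 0 := by
  induction doc generalizing d with
  | nil => simp [genDocLoopA, hnn]
  | cons c rest ih =>
    have hcond : (!d.contains c || d.getD c 0 == 0) = (d.getD c 0 == 0) := by
      by_cases h : d.contains c = true
      · simp [h]
      · have h0 : d.getD c 0 = 0 :=
          PySem.Dict.getD_of_not_contains (d := d) (k := c) (d0 := 0) (by simpa using h)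
        simp [h, h0]
    by_cases hz : d.getD c 0 = 0
    · have hfalse : genDocLoopA d (c :: rest) = false := by
        simp [genDocLoopA, hz]
      rw [hfalse]
      constructor
      · intro h; cases h
      · intro h
        have := h c
        rw [List.count_cons_self, hz] at this
        omega
    · have hpos : 0 < d.getD c 0 := lt_of_le_of_ne (hnn c) (Ne.symm hz)
      have hstep : genDocLoopA d (c :: rest)
          = genDocLoopA (d.insert c (d.getD c (0:Int) - 1)) rest := by
        simp [genDocLoopA, hcond, hz]
      rw [hstep, ih _ (by
        intro x
        rw [PySem.Dict.getD_insert]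
        split_ifs with hx
        · omega
        · exact hnn x)]
      constructor
      · intro h x
        have hx := h x
        rw [PySem.Dict.getD_insert] at hx
        by_cases hxc : x = c
        · subst hxc
          rw [if_pos rfl] at hx
          rw [List.count_cons_self]
          omega
        · rw [if_neg hxc] at hx
          rw [List.count_cons_of_ne (Ne.symm hxc)]
          exact hx
      · intro h x
        have hx := h x
        rw [PySem.Dict.getD_insert]
        by_cases hxc : x = c
        · subst hxc
          rw [List.count_cons_self] at hx
          rw [if_pos rfl]
          omega
        · rw [List.count_cons_of_ne (Ne.symm hxc)] at hx
          rw [if_neg hxc]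
          exact hx

lemma altB_iff (chars doc : List Char) :
    ((doc.foldl (fun d c => d.insert c (d.getD c (0:Int) + 1)) PySem.Dict.empty).items.all
      (fun p => !((chars.foldl (fun d c => d.insert c (d.getD c (0:Int) + 1)) PySem.Dict.empty).getD p.1 (0:Int) < p.2 : Bool))) = true
    ↔ ∀ c, (doc.count c : Int) ≤ (chars.count c : Int) := by
  simp only [PySem.Dict.foldl_insert_getD_add_one_eq_counter, PySem.Dict.items_counter]
  simp only [List.all_eq_true, List.mem_map]
  constructor
  · intro h c
    by_cases hc : c ∈ doc
    · have := h (c, (doc.count c : Int)) ⟨c, by simpa using hc, rfl⟩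
      simp [PySem.Dict.getD_counter] at this
      exact_mod_cast this
    · rw [List.count_eq_zero_of_not_mem hc]
      positivity
  · rintro h p ⟨c, hc, rfl⟩
    simp [PySem.Dict.getD_counter]
    exact_mod_cast h c

-- ===== VERDICT (by name: the statement is the Claim_ definition above) =====
theorem generateDocument_spec : Claim_equal_generateDocument := by
  intro characters document _
  unfold Spec_generateDocument generateDocument generateDocument_alt
  rw [Bool.eq_iff_iff]
  rw [foldA_eq]
  rw [genDocLoopA_iff _ _ (by
    intro c
    rw [PySem.Dict.getD_counter]
    positivity)]
  rw [altB_iff]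
  simp only [PySem.Dict.getD_counter]
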